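-- pv_equiv track=rewrite | github.com/lorenzo2505-font/ITS-Esercizi | preparazione settembre-ottobre/leet_code/binary_array.py | binary_array
-- ===== SOURCE A (Python) =====
-- def binary_array(nums: list[int], index: int):
--
--     max = False
--
--     for n in nums:
--
--         if n != 0 and n != 1:
--
--             raise ValueError("this array contains only binary numbers, so only 0 or 1")
--
--     if index > len(nums) - 1:
--
--         raise IndexError(f"index: {index} out of range")
--
--     nums.pop(index)
--
--     binary_string: str = ""
--
--     for i in nums:
--         binary_string += str(i)
--
--     newlist: list = binary_string.split("0")
--
--     for i in range(len(newlist)):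
--
--         if len(newlist[i]) > max or max is False:
--             max = len(newlist[i])
--
--     return max
-- ===== SOURCE B (Python) =====
-- def binary_array(nums: list[int], index: int):
--     for n in nums:
--         if n != 0 and n != 1:
--             raise ValueError("this array contains only binary numbers, so only 0 or 1")
--     if index > len(nums) - 1:
--         raise IndexError(f"index: {index} out of range")
--     nums.pop(index)
--     cur = 0
--     best = 0
--     for n in nums:
--         if n == 1:
--             cur += 1
--             best = max(best, cur)
--         else:
--             cur = 0
--     return best
-- ===== Notes on version B (the rewrite author's own statement) =====
-- stated objective: simpler
-- what changed: Replaces A's string building + split('0') + scan over the pieces with a single cur/best run-length pass over the popped list, with no string round-trip.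
import Mathlib
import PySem

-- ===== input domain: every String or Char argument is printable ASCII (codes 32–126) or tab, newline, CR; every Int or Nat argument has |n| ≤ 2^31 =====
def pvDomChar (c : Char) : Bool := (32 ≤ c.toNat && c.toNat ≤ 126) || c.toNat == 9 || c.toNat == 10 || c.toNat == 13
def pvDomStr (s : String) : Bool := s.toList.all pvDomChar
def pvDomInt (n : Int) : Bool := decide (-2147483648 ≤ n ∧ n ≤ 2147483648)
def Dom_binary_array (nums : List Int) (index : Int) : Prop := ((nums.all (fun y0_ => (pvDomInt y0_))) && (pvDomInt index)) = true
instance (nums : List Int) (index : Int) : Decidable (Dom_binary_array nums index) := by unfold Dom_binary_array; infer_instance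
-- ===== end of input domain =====

-- B replaces A's string building + split("0") + scan over the pieces by a single cur/best
-- run-length pass over the popped list (simpler, no string round-trip).
-- NOTE: both Pythons mutate `nums` in place (pop(index)); the equivalence proved here is about the return value.

-- ===== PORT A =====
-- literal port of A: validate binary, check index > len-1, pop, build the digit string,
-- split on '0', then the max-scan with `max` initialised to False (modelled as `none`).
def binary_array (nums : List Int) (index : Int) : Int :=
  if nums.any (fun n => n ≠ 0 && n ≠ 1) then 0          -- raise ValueError (outside Pre_)
  else if index > (nums.length : Int) - 1 then 0        -- raise IndexError (outside Pre_)
  else match PySem.List.pop? nums index with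
    | none => 0                                         -- IndexError from pop (outside Pre_)
    | some (_, rest) =>
      let binary_string : List Char := rest.foldl (fun s i => s ++ PySem.Int.toChars i) []
      let newlist : List (List Char) := PySem.Chars.splitOn binary_string ['0']
      let m : Option Int := newlist.foldl
        (fun m piece =>
          match m with
          | none => some (piece.length : Int)           -- `max is False` branch fires
          | some v => if (piece.length : Int) > v then some (piece.length : Int) else some v)
        none
      m.getD 0                                          -- unreachable default: newlist is never empty

-- ===== PORT B =====
def binary_array_alt (nums : List Int) (index : Int) : Int :=
  if nums.any (fun n => n ≠ 0 && n ≠ 1) then 0          -- raise ValueError (outside Pre_)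
  else if index > (nums.length : Int) - 1 then 0        -- raise IndexError (outside Pre_)
  else match PySem.List.pop? nums index with
    | none => 0                                         -- IndexError from pop (outside Pre_)
    | some (_, rest) =>
      (rest.foldl (fun (p : Int × Int) n =>
          if n = 1 then (p.1 + 1, max p.2 (p.1 + 1)) else (0, p.2)) (0, 0)).2

-- ===== PRECONDITION & SPEC =====
-- exactly the inputs on which A returns: all elements binary (else ValueError) and
-- index a valid pop index (else IndexError, from the explicit check or from pop).
def Pre_binary_array (nums : List Int) (index : Int) : Prop :=
  (∀ n ∈ nums, n = 0 ∨ n = 1) ∧ PySem.Raise.InRange nums.length index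
instance (nums : List Int) (index : Int) : Decidable (Pre_binary_array nums index) := by
  unfold Pre_binary_array; infer_instance
def pvWitness_binary_array : List Int × Int := ([1, 0, 1, 1], 0)

def Spec_binary_array (nums : List Int) (index : Int) (out : Int) : Prop := out = binary_array_alt nums index
instance (nums : List Int) (index : Int) (out : Int) : Decidable (Spec_binary_array nums index out) := by unfold Spec_binary_array; infer_instance

-- ===== CLAIM (what is proved, stated in full; the proofs are below) =====
def Claim_equal_binary_array : Prop := ∀ (nums : List Int) (index : Int), Dom_binary_array nums index → Pre_binary_array nums index → Spec_binary_array nums index (binary_array nums index)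

-- ===== LEMMAS AND PROOFS =====

-- nice structural form of splitting on the single character '0'
def split0 : List Char → List (List Char)
  | [] => [[]]
  | c :: cs => if c = '0' then [] :: split0 cs else (split0 cs).modifyHead (c :: ·)

theorem split0_ne_nil (cs : List Char) : split0 cs ≠ [] := by
  induction cs with
  | nil => simp [split0]
  | cons c cs ih =>
    simp only [split0]
    split
    · simp
    · cases h : split0 cs with
      | nil => exact absurd h ih
      | cons a t => simp [List.modifyHead]

theorem splitOn_go_eq (fuel : Nat) (l cur : List Char) (acc2 : List (List Char))
    (h : l.length < fuel) :
    PySem.Chars.splitOn.go ['0'] fuel l cur acc2 =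
      acc2.reverse ++ (split0 l).modifyHead (cur.reverse ++ ·) := by
  induction fuel generalizing l cur acc2 with
  | zero => omega
  | succ f ih =>
    cases l with
    | nil => simp [PySem.Chars.splitOn.go, split0, List.modifyHead]
    | cons c rest =>
      by_cases hc : c = '0'
      · subst hc
        rw [PySem.Chars.splitOn.go]
        simp only [List.isPrefixOf]
        rw [if_pos (by simp)]
        simp only [List.length_cons] at h
        simp only [List.length_cons, List.length_nil, List.drop_succ_cons, List.drop_zero]
        rw [ih rest [] _ (by omega)]
        simp [split0]
        cases hs : split0 rest with
        | nil => exact absurd hs (split0_ne_nil rest)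
        | cons a t => simp [List.modifyHead]
      · rw [PySem.Chars.splitOn.go]
        simp only [List.isPrefixOf_iff_prefix]
        rw [if_neg (by simp [List.cons_prefix_cons]; exact fun h => hc h.symm)]
        simp only [List.length_cons] at h
        rw [ih rest (c :: cur) _ (by omega)]
        simp only [split0, if_neg hc]
        cases hs : split0 rest with
        | nil => exact absurd hs (split0_ne_nil rest)
        | cons a t => simp [List.modifyHead, List.append_assoc]

theorem splitOn_eq_split0 (cs : List Char) :
    PySem.Chars.splitOn cs ['0'] = split0 cs := by
  have := splitOn_go_eq (cs.length + 1) cs [] [] (by omega)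
  rw [PySem.Chars.splitOn, this]
  cases hs : split0 cs with
  | nil => exact absurd hs (split0_ne_nil cs)
  | cons a t => simp [List.modifyHead]

-- shorthand for the running max of piece lengths
def F (t : List (List Char)) (a : Int) : Int :=
  t.foldl (fun m p => max m (p.length : Int)) a

theorem F_max (t : List (List Char)) (a b : Int) : F t (max a b) = max a (F t b) := by
  induction t generalizing b with
  | nil => simp [F]
  | cons p t ih =>
    simp only [F, List.foldl_cons] at *
    rw [max_assoc, ih]

theorem le_F (t : List (List Char)) (a : Int) : a ≤ F t a :=
  (PySem.List.le_foldl_max_int t (fun p => (p.length : Int)) a).1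

-- value of A's scan, with the popped run prefixed by c extra ones
def Mc (c : Int) : List (List Char) → Int
  | [] => 0
  | h :: t => F t (max 0 (c + (h.length : Int)))

theorem B_fold_eq (rest : List Int) (hb : ∀ n ∈ rest, n = 0 ∨ n = 1) :
    ∀ c b : Int, 0 ≤ c → c ≤ b →
    (rest.foldl (fun (p : Int × Int) n =>
        if n = 1 then (p.1 + 1, max p.2 (p.1 + 1)) else (0, p.2)) (c, b)).2
      = max b (Mc c (split0 (rest.flatMap PySem.Int.toChars))) := by
  induction rest with
  | nil =>
    intro c b hc hcb
    simp [split0, Mc, F, max_eq_right hc, max_eq_left hcb]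
  | cons n rest ih =>
    intro c b hc hcb
    have hbrest : ∀ m ∈ rest, m = 0 ∨ m = 1 := fun m hm => hb m (List.mem_cons_of_mem _ hm)
    rcases hb n (List.mem_cons_self) with h0 | h1
    · subst h0
      have htc : PySem.Int.toChars (0 : Int) = ['0'] := by decide
      simp only [List.flatMap_cons, htc, List.cons_append, List.nil_append, List.foldl_cons]
      rw [if_neg (by decide : ¬ ((0:Int) = 1))]
      rw [ih hbrest 0 b le_rfl (le_trans hc hcb)]
      cases hs : split0 (rest.flatMap PySem.Int.toChars) with
      | nil => exact absurd hs (split0_ne_nil _)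
      | cons h t =>
        rw [show split0 ('0' :: rest.flatMap PySem.Int.toChars)
              = [] :: split0 (rest.flatMap PySem.Int.toChars) by simp [split0]]
        rw [hs]
        have hgoal : Mc c ([] :: h :: t) = max c (Mc 0 (h :: t)) := by
          show F (h :: t) (max 0 (c + (([] : List Char).length : Int)))
                = max c (F t (max 0 (0 + (h.length : Int))))
          have h2 : max (0:Int) (c + (([] : List Char).length : Int)) = c := by
            simp only [List.length_nil]; omega
          have h1 : max (0:Int) (0 + (h.length : Int)) = (h.length : Int) := by omega
          rw [h2, h1]
          show F t (max c (h.length : Int)) = max c (F t (h.length : Int))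
          exact F_max t c (h.length : Int)
        rw [hgoal]
        omega
    · subst h1
      have htc : PySem.Int.toChars (1 : Int) = ['1'] := by decide
      simp only [List.flatMap_cons, htc, List.cons_append, List.nil_append, List.foldl_cons,
        reduceIte]
      rw [ih hbrest (c + 1) (max b (c + 1)) (by omega) (le_max_right _ _)]
      cases hs : split0 (rest.flatMap PySem.Int.toChars) with
      | nil => exact absurd hs (split0_ne_nil _)
      | cons h t =>
        rw [show split0 ('1' :: rest.flatMap PySem.Int.toChars) = ('1' :: h) :: t by
          simp [split0, hs, List.modifyHead]]
        have hgoal : Mc c (('1' :: h) :: t) = Mc (c + 1) (h :: t) := by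
          show F t (max 0 (c + ((('1' :: h).length : Nat) : Int)))
                = F t (max 0 ((c + 1) + (h.length : Int)))
          congr 1
          simp only [List.length_cons]
          push_cast
          omega
        rw [hgoal]
        have hM : c + 1 ≤ Mc (c + 1) (h :: t) := by
          show c + 1 ≤ F t (max 0 ((c + 1) + (h.length : Int)))
          have := le_F t (max 0 ((c + 1) + (h.length : Int)))
          omega
        omega

theorem foldA_some (t : List (List Char)) : ∀ m : Int,
    t.foldl (fun (m : Option Int) piece =>
        match m with
        | none => some (piece.length : Int)
        | some v => if (piece.length : Int) > v then some (piece.length : Int) else some v)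
      (some m) = some (F t m) := by
  induction t with
  | nil => intro m; simp [F]
  | cons p t ih =>
    intro m
    simp only [List.foldl_cons, F, List.foldl_cons]
    rw [show (if (p.length : Int) > m then some ((p.length : Int)) else some m)
          = some (max m (p.length : Int)) by
      split_ifs with hgt
      · congr 1; omega
      · congr 1; omega]
    exact ih _

theorem core_eq (rest : List Int) (hb : ∀ n ∈ rest, n = 0 ∨ n = 1) :
    ((PySem.Chars.splitOn (rest.foldl (fun s i => s ++ PySem.Int.toChars i) []) ['0']).foldl
        (fun (m : Option Int) piece =>
          match m with
          | none => some (piece.length : Int)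
          | some v => if (piece.length : Int) > v then some (piece.length : Int) else some v)
        none).getD 0
      = (rest.foldl (fun (p : Int × Int) n =>
          if n = 1 then (p.1 + 1, max p.2 (p.1 + 1)) else (0, p.2)) (0, 0)).2 := by
  rw [PySem.List.foldl_append_eq_flatMap PySem.Int.toChars rest []]
  rw [List.nil_append, splitOn_eq_split0]
  rw [B_fold_eq rest hb 0 0 le_rfl le_rfl]
  cases hs : split0 (rest.flatMap PySem.Int.toChars) with
  | nil => exact absurd hs (split0_ne_nil _)
  | cons h t =>
    simp only [List.foldl_cons]
    rw [foldA_some t (h.length : Int), Option.getD_some]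
    simp only [Mc]
    have hl : (0 : Int) ≤ (h.length : Int) := Int.natCast_nonneg _
    rw [show max (0:Int) (0 + (h.length : Int)) = (h.length : Int) by omega]
    have := le_F t (h.length : Int)
    omega

-- ===== VERDICT (by name: the statement is the Claim_ definition above) =====
theorem binary_array_spec : Claim_equal_binary_array := by
  intro nums index _ hpre
  unfold Spec_binary_array binary_array binary_array_alt
  split
  · rfl
  · split
    · rfl
    · cases hp : PySem.List.pop? nums index with
      | none => rfl
      | some r =>
        obtain ⟨v, rest⟩ := r
        have hrest : ∀ n ∈ rest, n = 0 ∨ n = 1 := by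
          intro m hm
          apply hpre.1
          cases hk : PySem.List.pyIdx? nums.length index <;>
            rw [PySem.List.pop?, hk] at hp
          · simp at hp
          · rename_i k
            rw [show ((some k).bind fun k => Option.map (fun x => (x, nums.eraseIdx k)) nums[k]?)
                  = Option.map (fun x => (x, nums.eraseIdx k)) nums[k]? from rfl] at hp
            cases hg : nums[k]? <;> rw [hg] at hp <;> simp at hp
            exact List.mem_of_mem_eraseIdx (hp.2 ▸ hm)
        exact core_eq rest hrest
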